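-- pv_equiv track=rewrite | github.com/QualifAIze/qualifaize_ui | utils.py | get_role_display
-- ===== SOURCE A (Python) =====
-- def get_role_display(roles):
--     """Convert roles list to display string"""
--     if not roles:
--         return "Guest"
--
--     # Show all roles, prioritizing highest
--     role_priority = {"ADMIN": 3, "USER": 2, "GUEST": 1}
--     sorted_roles = sorted(roles, key=lambda x: role_priority.get(x, 0), reverse=True)
--
--     if len(sorted_roles) == 1:
--         role = sorted_roles[0]
--         if role == "ADMIN":
--             return "Administrator"
--         elif role == "USER":
--             return "User"
--         else:
--             return "Guest"
--     else:
--         # Multiple roles - show highest priority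
--         return get_role_display([sorted_roles[0]])
-- ===== SOURCE B (Python) =====
-- def get_role_display(roles):
--     """Convert roles list to display string"""
--     if not roles:
--         return "Guest"
--     role_priority = {"ADMIN": 3, "USER": 2, "GUEST": 1}
--     top = max(roles, key=lambda x: role_priority.get(x, 0))
--     return {"ADMIN": "Administrator", "USER": "User"}.get(top, "Guest")
-- ===== Notes on version B (the rewrite author's own statement) =====
-- stated objective: simpler
-- what changed: Replaces the stable reverse sort plus a recursive call on a singleton with a single max-scan (first maximal element, matching the stable sort's tie-break) and a direct display-dict lookup.
import Mathlib
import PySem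

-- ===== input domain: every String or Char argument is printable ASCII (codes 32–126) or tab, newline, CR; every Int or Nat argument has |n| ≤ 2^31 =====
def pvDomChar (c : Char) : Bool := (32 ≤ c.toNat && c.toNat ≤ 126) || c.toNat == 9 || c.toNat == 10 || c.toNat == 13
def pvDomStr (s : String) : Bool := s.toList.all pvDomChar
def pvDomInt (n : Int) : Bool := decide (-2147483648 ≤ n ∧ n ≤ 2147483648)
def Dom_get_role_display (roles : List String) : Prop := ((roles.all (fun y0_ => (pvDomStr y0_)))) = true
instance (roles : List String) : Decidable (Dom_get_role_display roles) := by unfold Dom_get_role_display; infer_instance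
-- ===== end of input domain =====

-- B replaces A's stable reverse sort + recursion on a singleton with a single
-- first-maximal max-scan and a direct display-dict lookup (objective: simpler).

-- ===== PORT A =====
-- role_priority.get(x, 0)
def pvPrio (x : String) : Int :=
  (PySem.Dict.ofList [("ADMIN", (3 : Int)), ("USER", 2), ("GUEST", 1)]).getD x 0

-- literal port of A: empty guard, stable reverse sort by priority, then either the
-- one-element branch or the recursive call on the singleton [sorted_roles[0]]
-- (sorted_roles is nonempty there, so sorted_roles[0] is its head)
def get_role_display (roles : List String) : String :=
  if roles = [] then "Guest"
  else
    let sorted_roles := PySem.List.sorted roles pvPrio true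
    if sorted_roles.length = 1 then
      let role := sorted_roles.headD ""
      if role = "ADMIN" then "Administrator"
      else if role = "USER" then "User"
      else "Guest"
    else
      get_role_display [sorted_roles.headD ""]
termination_by roles.length
decreasing_by
  rename_i h1 h2
  simp only [sorted_roles, PySem.List.length_sorted] at h2
  simp only [List.length_singleton]
  cases roles with
  | nil => exact absurd rfl h1
  | cons a t =>
    simp only [List.length_cons] at h2 ⊢
    omega

-- ===== PORT B =====
-- port of B: max-scan by the same priorities (first maximal element), display-dict lookup
def get_role_display_alt (roles : List String) : String :=
  if roles = [] then "Guest"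
  else
    let top := (PySem.List.max? roles pvPrio).getD ""
    (PySem.Dict.ofList [("ADMIN", "Administrator"), ("USER", "User")]).getD top "Guest"

-- ===== PRECONDITION & SPEC =====
def Spec_get_role_display (roles : List String) (out : String) : Prop := out = get_role_display_alt roles
instance (roles : List String) (out : String) : Decidable (Spec_get_role_display roles out) := by unfold Spec_get_role_display; infer_instance

-- ===== CLAIM (what is proved, stated in full; the proofs are below) =====
def Claim_equal_get_role_display : Prop := ∀ (roles : List String), Dom_get_role_display roles → Spec_get_role_display roles (get_role_display roles)

-- ===== LEMMAS AND PROOFS =====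

-- ===== VERDICT (by name: the statement is the Claim_ definition above) =====
-- the priority key, written out
theorem pvPrio_eq (x : String) :
    pvPrio x = if x = "ADMIN" then 3 else if x = "USER" then 2 else if x = "GUEST" then 1 else 0 := by
  by_cases h1 : x = "ADMIN"
  · subst h1; decide
  · by_cases h2 : x = "USER"
    · subst h2; decide
    · by_cases h3 : x = "GUEST"
      · subst h3; decide
      · rw [if_neg h1, if_neg h2, if_neg h3]
        show ((PySem.Dict.mk [("ADMIN", (3 : Int)), ("USER", 2), ("GUEST", 1)]).get? x).getD 0 = 0
        simp only [PySem.Dict.get?_mk_cons, beq_iff_eq]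
        rw [if_neg (fun h => h1 h.symm), if_neg (fun h => h2 h.symm), if_neg (fun h => h3 h.symm)]
        rfl

-- the display value of a role depends only on its priority
def pvDisp (x : String) : String :=
  if x = "ADMIN" then "Administrator" else if x = "USER" then "User" else "Guest"

theorem pvDisp_eq_of_prio_eq {a b : String} (h : pvPrio a = pvPrio b) : pvDisp a = pvDisp b := by
  rw [pvPrio_eq, pvPrio_eq] at h
  unfold pvDisp
  split_ifs at h ⊢ <;> simp_all

theorem pvAlt_eq_disp (roles : List String) (t : String)
    (ht : PySem.List.max? roles pvPrio = some t) :
    get_role_display_alt roles = pvDisp t := by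
  have hne : roles ≠ [] := by
    intro h
    rw [(PySem.List.max?_eq_none_iff roles pvPrio).mpr h] at ht
    cases ht
  rw [get_role_display_alt, if_neg hne]
  simp only [ht, Option.getD_some]
  by_cases h1 : t = "ADMIN"
  · subst h1; decide
  · by_cases h2 : t = "USER"
    · subst h2; decide
    · show ((PySem.Dict.mk [("ADMIN", "Administrator"), ("USER", "User")]).get? t).getD "Guest" = pvDisp t
      unfold pvDisp
      rw [if_neg h1, if_neg h2]
      simp only [PySem.Dict.get?_mk_cons, beq_iff_eq]
      rw [if_neg (fun h => h1 h.symm), if_neg (fun h => h2 h.symm)]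
      rfl

-- A returns the display of the head of the reverse-sorted list
theorem pvA_eq_disp (roles : List String) (m : String) (t : List String)
    (hs : PySem.List.sorted roles pvPrio true = m :: t) :
    get_role_display roles = pvDisp m := by
  have hne : roles ≠ [] := by
    intro h
    rw [(PySem.List.sorted_eq_nil_iff roles pvPrio true).mpr h] at hs
    cases hs
  rw [get_role_display, if_neg hne]
  simp only [hs, List.headD_cons]
  by_cases hlen : (m :: t).length = 1
  · rw [if_pos hlen]
    rfl
  · rw [if_neg hlen]
    -- evaluate A on the singleton [m]
    rw [get_role_display]
    have hsing : PySem.List.sorted [m] pvPrio true = [m] := by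
      apply PySem.List.sorted_rev_eq_self_of_pairwise
      simp
    rw [if_neg (by simp : ¬([m] : List String) = [])]
    simp only [hsing, List.headD_cons, List.length_singleton]
    rfl

theorem get_role_display_spec : Claim_equal_get_role_display := by
  intro roles _
  unfold Spec_get_role_display
  cases hroles : roles with
  | nil => simp [get_role_display, get_role_display_alt]
  | cons r rs =>
    obtain ⟨m, tl, hs⟩ : ∃ m tl, PySem.List.sorted (r :: rs) pvPrio true = m :: tl := by
      cases h : PySem.List.sorted (r :: rs) pvPrio true with
      | nil =>
        exact absurd ((PySem.List.sorted_eq_nil_iff (r :: rs) pvPrio true).mp h) (by simp)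
      | cons a b => exact ⟨a, b, rfl⟩
    obtain ⟨t, ht⟩ : ∃ t, PySem.List.max? (r :: rs) pvPrio = some t := by
      cases h : PySem.List.max? (r :: rs) pvPrio with
      | none =>
        exact absurd ((PySem.List.max?_eq_none_iff (r :: rs) pvPrio).mp h) (by simp)
      | some a => exact ⟨a, rfl⟩
    rw [pvA_eq_disp _ _ _ hs, pvAlt_eq_disp _ _ ht]
    apply pvDisp_eq_of_prio_eq
    have hm_mem : m ∈ (r :: rs) := by
      have hp := PySem.List.sorted_perm (r :: rs) pvPrio true
      rw [hs] at hp
      exact hp.mem_iff.mp (by simp)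
    have ht_mem : t ∈ (r :: rs) := PySem.List.max?_mem ht
    have h1 : pvPrio t ≤ pvPrio m := PySem.List.key_head_sorted_rev_ge _ pvPrio hs t ht_mem
    have h2 : pvPrio m ≤ pvPrio t := PySem.List.max?_isMax ht m hm_mem
    omega
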